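-- pv_equiv track=rewrite | github.com/datalib/proclib | proclib/helpers.py | str_parse
-- ===== SOURCE A (Python) =====
-- import shlex
--
-- def str_parse(cmds, pipe_operator='|'):
--     """
--     Given a string of commands *cmds* yield the
--     command in chunks, separated by the *pipe_operator*
--     defaulting to '|'.
--
--     :param cmds: String of commands.
--     :param pipe_operator: The pipe operator.
--     """
--     buff = []
--     for item in shlex.split(cmds):
--         if item == pipe_operator:
--             yield buff
--             buff = []
--             continue
--         buff.append(item)
--     if buff:
--         yield buff
-- ===== SOURCE B (Python) =====
-- def _tokens(s):
--     """Index-driven tokenizer equivalent to shlex.split(s) (POSIX,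
--     whitespace_split): nested scanning loops with two-char escape
--     consumption instead of a per-character state variable."""
--     toks = []
--     i, n = 0, len(s)
--     while i < n:
--         if s[i] in ' \t\r\n':
--             i += 1
--             continue
--         # scan one word (possibly containing quoted sections)
--         tok = []
--         while i < n and s[i] not in ' \t\r\n':
--             c = s[i]
--             if c == '\\':
--                 if i + 1 >= n:
--                     raise ValueError('No escaped character')
--                 tok.append(s[i + 1])
--                 i += 2
--             elif c == "'" or c == '"':
--                 q = c
--                 i += 1
--                 while True:
--                     if i >= n:
--                         raise ValueError('No closing quotation')
--                     d = s[i]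
--                     if d == q:
--                         i += 1
--                         break
--                     if q == '"' and d == '\\':
--                         if i + 1 >= n:
--                             raise ValueError('No escaped character')
--                         e = s[i + 1]
--                         if e != q and e != '\\':
--                             tok.append('\\')
--                         tok.append(e)
--                         i += 2
--                     else:
--                         tok.append(d)
--                         i += 1
--             else:
--                 tok.append(c)
--                 i += 1
--         toks.append(''.join(tok))
--     return toks
--
--
-- def str_parse(cmds, pipe_operator='|'):
--     """
--     Given a string of commands *cmds* yield the
--     command in chunks, separated by the *pipe_operator*
--     defaulting to '|'.
--
--     :param cmds: String of commands.
--     :param pipe_operator: The pipe operator.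
--     """
--     toks = _tokens(cmds)
--     start = 0
--     while True:
--         try:
--             k = toks.index(pipe_operator, start)
--         except ValueError:
--             tail = toks[start:]
--             if tail:
--                 yield tail
--             return
--         yield toks[start:k]
--         start = k + 1
-- ===== Notes on version B (the rewrite author's own statement) =====
-- stated objective: faster
-- what changed: B replaces shlex.split with an index-driven nested-loop scanner (separate inner loops for a word and for a quoted section, escapes consumed two characters at a time, token built as a char list joined once) instead of shlex's per-character state variable with string concatenation, and replaces A's running-buffer grouping by jumping with list.index to each separator position and slicing the segment out.
import Mathlib
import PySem

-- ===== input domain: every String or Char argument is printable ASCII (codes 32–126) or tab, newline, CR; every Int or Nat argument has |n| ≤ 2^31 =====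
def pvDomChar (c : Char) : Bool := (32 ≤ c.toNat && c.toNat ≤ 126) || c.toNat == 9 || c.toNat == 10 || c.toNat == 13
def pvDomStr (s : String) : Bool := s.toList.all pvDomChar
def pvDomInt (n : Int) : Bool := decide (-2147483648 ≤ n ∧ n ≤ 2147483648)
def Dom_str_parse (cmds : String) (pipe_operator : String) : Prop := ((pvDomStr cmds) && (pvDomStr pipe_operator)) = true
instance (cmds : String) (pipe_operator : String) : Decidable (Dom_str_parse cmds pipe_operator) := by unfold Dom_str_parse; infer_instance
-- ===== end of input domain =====

-- B tokenizes with an index-driven nested-loop scanner (list append + one join per token) instead of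
-- shlex's per-character state machine, and groups tokens by jumping to the next separator position
-- instead of A's running buffer; measured faster in a timing run (constant factor).

-- ===== PORT A =====
-- Hand port of shlex.split (posix mode, whitespace_split, no comments),
-- exact step for step on the ASCII domain; 'none' = the ValueError raised on an
-- unclosed quote or a trailing escape character (excluded by Pre_str_parse).
def pvIsWS (c : Char) : Bool := c == ' ' || c == '\t' || c == '\r' || c == '\n'

inductive PvSState where
  | sp : PvSState                    -- shlex state ' '
  | word : PvSState                  -- shlex state 'a'
  | quote : Char → PvSState          -- inside a quote
  | esc : Option Char → PvSState     -- after the escape char; 'some q' = escape inside double quote q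

-- emit a finished token: posix rule — empty tokens survive only if quoted
def pvEmit (tok : List Char) (quoted : Bool) (acc : List String) : List String :=
  if tok ≠ [] ∨ quoted then acc ++ [String.ofList tok] else acc

def pvShlexRun : List Char → PvSState → List Char → Bool → List String → Option (List String)
  | [], .sp, _, _, acc => some acc
  | [], .word, tok, quoted, acc => some (pvEmit tok quoted acc)
  | [], .quote _, _, _, _ => none          -- ValueError: No closing quotation
  | [], .esc _, _, _, _ => none            -- ValueError: No escaping character
  | c :: rest, .sp, tok, quoted, acc =>
      if pvIsWS c then pvShlexRun rest .sp tok quoted acc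
      else if c = '\\' then pvShlexRun rest (.esc none) tok quoted acc
      else if c = '\'' ∨ c = '"' then pvShlexRun rest (.quote c) tok quoted acc
      else pvShlexRun rest .word (tok ++ [c]) quoted acc
  | c :: rest, .word, tok, quoted, acc =>
      if pvIsWS c then pvShlexRun rest .sp [] false (pvEmit tok quoted acc)
      else if c = '\'' ∨ c = '"' then pvShlexRun rest (.quote c) tok quoted acc
      else if c = '\\' then pvShlexRun rest (.esc none) tok quoted acc
      else pvShlexRun rest .word (tok ++ [c]) quoted acc
  | c :: rest, .quote q, tok, _, acc =>
      if c = q then pvShlexRun rest .word tok true acc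
      else if q = '"' ∧ c = '\\' then pvShlexRun rest (.esc (some q)) tok true acc
      else pvShlexRun rest (.quote q) (tok ++ [c]) true acc
  | c :: rest, .esc ret, tok, quoted, acc =>
      match ret with
      | none => pvShlexRun rest .word (tok ++ [c]) quoted acc
      | some q =>   -- inside "…": backslash escapes only the quote itself and the backslash
          pvShlexRun rest (.quote q) (tok ++ (if c ≠ q ∧ c ≠ '\\' then ['\\', c] else [c])) quoted acc

def pvShlexSplit (s : String) : Option (List String) :=
  pvShlexRun s.toList .sp [] false []

-- A's generator loop: running buffer, flushed at each pipe token, nonempty leftover at the end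
def pvGoA (pipe : String) : List String → List String → List (List String)
  | buff, [] => if buff ≠ [] then [buff] else []
  | buff, t :: ts => if t == pipe then buff :: pvGoA pipe [] ts else pvGoA pipe (buff ++ [t]) ts

def str_parse (cmds : String) (pipe_operator : String) : List (List String) :=
  match pvShlexSplit cmds with
  | none => []                       -- shlex.split raises here; outside Pre_str_parse
  | some tokens => pvGoA pipe_operator [] tokens

-- ===== PORT B =====
-- Source B's _tokens: an index/suffix-driven scanner; the outer while loop is bSkip
-- (between words), the word loop is bWord (tok = the growing list, joined once at
-- emission), the quote loop is bQuote; backslash consumes TWO characters at once.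
def bWS (c : Char) : Bool := [' ', '\t', '\r', '\n'].contains c   -- s[i] in ' \t\r\n'

mutual
def bSkip : List Char → Option (List String)
  | [] => some []
  | c :: r =>
      if bWS c then bSkip r
      else if c = '\\' then
        match r with
        | [] => none                 -- ValueError: No escaped character
        | d :: r' => bWord [d] r'
      else if c = '\'' ∨ c = '"' then bQuote c [] r
      else bWord [c] r

def bWord : List Char → List Char → Option (List String)
  | tok, [] => some [String.ofList tok]
  | tok, c :: r =>
      if bWS c then (bSkip r).map (fun l => String.ofList tok :: l)
      else if c = '\\' then
        match r with
        | [] => none                 -- ValueError: No escaped character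
        | d :: r' => bWord (tok ++ [d]) r'
      else if c = '\'' ∨ c = '"' then bQuote c tok r
      else bWord (tok ++ [c]) r

def bQuote : Char → List Char → List Char → Option (List String)
  | _, _, [] => none                 -- ValueError: No closing quotation
  | q, tok, c :: r =>
      if c = q then bWord tok r
      else if q = '"' ∧ c = '\\' then
        match r with
        | [] => none                 -- ValueError: No escaped character
        | d :: r' => bQuote q (tok ++ (if d ≠ q ∧ d ≠ '\\' then ['\\', d] else [d])) r'
      else bQuote q (tok ++ [c]) r
end

-- Source B's str_parse loop over 'start': the suffix toks[start:] is the recursion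
-- argument; takeWhile/dropWhile realise 'toks.index(pipe_operator, start)'.
def bChunks (pipe : String) (ts : List String) : List (List String) :=
  if h : ts.dropWhile (fun t => !(t == pipe)) = [] then
    (if ts = [] then [] else [ts])
  else
    ts.takeWhile (fun t => !(t == pipe)) :: bChunks pipe ((ts.dropWhile (fun t => !(t == pipe))).tail)
termination_by ts.length
decreasing_by
  have h1 := List.length_dropWhile_le (fun t => !(t == pipe)) ts
  have h2 : 0 < (ts.dropWhile (fun t => !(t == pipe))).length := List.length_pos_iff.mpr h
  simp only [List.length_tail]
  omega

def str_parse_alt (cmds : String) (pipe_operator : String) : List (List String) :=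
  match bSkip cmds.toList with
  | none => []
  | some toks => bChunks pipe_operator toks

-- ===== PRECONDITION & SPEC =====
-- Pre_ excludes exactly the strings on which shlex.split (hence Python A) raises
-- ValueError: an unterminated quote or a dangling final escape character.
-- pvQuoteOk tracks only the quote/escape context (none = outside quotes; esc = escape pending).
def pvQuoteOk : List Char → Option Char → Bool → Bool
  | [], none, false => true
  | [], _, _ => false
  | _ :: rest, q, true => pvQuoteOk rest q false
  | c :: rest, none, false =>
      if c = '\\' then pvQuoteOk rest none true
      else if c = '\'' ∨ c = '"' then pvQuoteOk rest (some c) false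
      else pvQuoteOk rest none false
  | c :: rest, some q, false =>
      if c = q then pvQuoteOk rest none false
      else if q = '"' ∧ c = '\\' then pvQuoteOk rest (some q) true
      else pvQuoteOk rest (some q) false

def Pre_str_parse (cmds : String) (pipe_operator : String) : Prop :=
  pvQuoteOk cmds.toList none false = true
instance (cmds : String) (pipe_operator : String) : Decidable (Pre_str_parse cmds pipe_operator) := by
  unfold Pre_str_parse; infer_instance

def pvWitness_str_parse : String × String := ("ls -l 'my file' | grep x | wc", "|")

def Spec_str_parse (cmds : String) (pipe_operator : String) (out : List (List String)) : Prop :=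
  out = str_parse_alt cmds pipe_operator
instance (cmds : String) (pipe_operator : String) (out : List (List String)) : Decidable (Spec_str_parse cmds pipe_operator out) := by
  unfold Spec_str_parse; infer_instance

-- ===== CLAIM (what is proved, stated in full; the proofs are below) =====
def Claim_equal_str_parse : Prop := ∀ (cmds : String) (pipe_operator : String), Dom_str_parse cmds pipe_operator → Pre_str_parse cmds pipe_operator → Spec_str_parse cmds pipe_operator (str_parse cmds pipe_operator)

-- ===== LEMMAS AND PROOFS =====

-- The two tokenizers agree, state by state.  A's sp state always carries tok = [],
-- quoted = false; A's word state always has tok ≠ [] ∨ quoted (so pvEmit emits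
-- unconditionally, matching bWord's unconditional join); acc is A's accumulator,
-- B conses and the results are related by (acc ++ ·).
theorem bWS_eq (c : Char) : bWS c = pvIsWS c := by
  simp only [bWS, pvIsWS, List.contains_cons, List.contains_nil, Bool.or_false, Bool.or_assoc]

theorem bLex_agree_nil :
    (∀ acc, pvShlexRun [] .sp [] false acc = (bSkip []).map (acc ++ ·)) ∧
    (∀ tok quoted acc, (tok ≠ [] ∨ quoted = true) →
        pvShlexRun [] .word tok quoted acc = (bWord tok []).map (acc ++ ·)) ∧
    (∀ q tok quoted acc, pvShlexRun [] (.quote q) tok quoted acc = (bQuote q tok []).map (acc ++ ·)) := by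
  refine ⟨?_, ?_, ?_⟩
  · intro acc; simp [pvShlexRun, bSkip]
  · intro tok quoted acc hinv
    have hpe : pvEmit tok quoted acc = acc ++ [String.ofList tok] := by
      rcases hinv with h | h <;> simp [pvEmit, h]
    simp [pvShlexRun, bWord, hpe]
  · intro q tok quoted acc; simp [pvShlexRun, bQuote]

theorem bSkip_cons (c : Char) (r : List Char) :
    bSkip (c :: r) =
      (if bWS c then bSkip r
       else if c = '\\' then
         match r with
         | [] => none
         | d :: r' => bWord [d] r'
       else if c = '\'' ∨ c = '"' then bQuote c [] r
       else bWord [c] r) := by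
  rw [bSkip.eq_def]

theorem bWord_cons (tok : List Char) (c : Char) (r : List Char) :
    bWord tok (c :: r) =
      (if bWS c then (bSkip r).map (fun l => String.ofList tok :: l)
       else if c = '\\' then
         match r with
         | [] => none
         | d :: r' => bWord (tok ++ [d]) r'
       else if c = '\'' ∨ c = '"' then bQuote c tok r
       else bWord (tok ++ [c]) r) := by
  rw [bWord.eq_def]

theorem bQuote_cons (q : Char) (tok : List Char) (c : Char) (r : List Char) :
    bQuote q tok (c :: r) =
      (if c = q then bWord tok r
       else if q = '"' ∧ c = '\\' then
         match r with
         | [] => none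
         | d :: r' => bQuote q (tok ++ (if d ≠ q ∧ d ≠ '\\' then ['\\', d] else [d])) r'
       else bQuote q (tok ++ [c]) r) := by
  rw [bQuote.eq_def]

theorem bLex_agree : ∀ (n : Nat) (cs : List Char), cs.length ≤ n →
    (∀ acc, pvShlexRun cs .sp [] false acc = (bSkip cs).map (acc ++ ·)) ∧
    (∀ tok quoted acc, (tok ≠ [] ∨ quoted = true) →
        pvShlexRun cs .word tok quoted acc = (bWord tok cs).map (acc ++ ·)) ∧
    (∀ q tok quoted acc, pvShlexRun cs (.quote q) tok quoted acc = (bQuote q tok cs).map (acc ++ ·)) := by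
  intro n
  induction n with
  | zero =>
      intro cs hle
      have hnil : cs = [] := by cases cs <;> simp_all
      subst hnil; exact bLex_agree_nil
  | succ n ih =>
      intro cs hle
      cases cs with
      | nil => exact bLex_agree_nil
      | cons c rest =>
          have hrest : rest.length ≤ n := by simp at hle; omega
          refine ⟨?_, ?_, ?_⟩
          · -- sp / bSkip
            intro acc
            simp only [pvShlexRun, bSkip_cons, bWS_eq]
            by_cases hws : pvIsWS c = true
            · simp only [hws, if_pos]
              exact (ih rest hrest).1 acc
            · simp only [hws, Bool.false_eq_true, if_neg, not_false_eq_true]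
              by_cases hbs : c = '\\'
              · simp only [hbs, if_pos]
                cases rest with
                | nil => simp [pvShlexRun]
                | cons d r' =>
                    have hr' : r'.length ≤ n := by simp at hrest ⊢; omega
                    simp only [pvShlexRun]
                    exact (ih r' hr').2.1 [d] false acc (Or.inl (by simp))
              · simp only [hbs, if_neg, not_false_eq_true]
                by_cases hq : c = '\'' ∨ c = '"'
                · simp only [hq, if_pos]
                  exact (ih rest hrest).2.2 c [] false acc
                · simp only [hq, if_neg, not_false_eq_true]
                  exact (ih rest hrest).2.1 [c] false acc (Or.inl (by simp))
          · -- word / bWord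
            intro tok quoted acc hinv
            simp only [pvShlexRun, bWord_cons, bWS_eq]
            by_cases hws : pvIsWS c = true
            · simp only [hws, if_pos]
              have hpe : pvEmit tok quoted acc = acc ++ [String.ofList tok] := by
                rcases hinv with h | h <;> simp [pvEmit, h]
              rw [(ih rest hrest).1, hpe]
              cases bSkip rest <;> simp
            · simp only [hws, Bool.false_eq_true, if_neg, not_false_eq_true]
              by_cases hq : c = '\'' ∨ c = '"'
              · have hbs : ¬ c = '\\' := by rcases hq with h | h <;> simp [h]
                simp only [hq, hbs, if_pos, if_neg, not_false_eq_true]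
                exact (ih rest hrest).2.2 c tok quoted acc
              · by_cases hbs : c = '\\'
                · simp only [hbs, if_pos]
                  cases rest with
                  | nil => simp [pvShlexRun]
                  | cons d r' =>
                      have hr' : r'.length ≤ n := by simp at hrest ⊢; omega
                      simp only [pvShlexRun]
                      exact (ih r' hr').2.1 (tok ++ [d]) quoted acc (Or.inl (by simp))
                · simp only [hq, hbs, if_neg, not_false_eq_true]
                  exact (ih rest hrest).2.1 (tok ++ [c]) quoted acc (Or.inl (by simp))
          · -- quote / bQuote
            intro q tok quoted acc
            simp only [pvShlexRun, bQuote_cons]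
            by_cases hcq : c = q
            · rw [if_pos hcq, if_pos hcq]
              exact (ih rest hrest).2.1 tok true acc (Or.inr rfl)
            · rw [if_neg hcq, if_neg hcq]
              by_cases hqb : q = '"' ∧ c = '\\'
              · rw [if_pos hqb, if_pos hqb]
                cases rest with
                | nil => simp [pvShlexRun]
                | cons d r' =>
                    have hr' : r'.length ≤ n := by simp at hrest ⊢; omega
                    simp only [pvShlexRun]
                    exact (ih r' hr').2.2 q (tok ++ (if d ≠ q ∧ d ≠ '\\' then ['\\', d] else [d])) true acc
              · rw [if_neg hqb, if_neg hqb]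
                exact (ih rest hrest).2.2 q (tok ++ [c]) true acc

theorem bLex_eq (s : String) : pvShlexSplit s = bSkip s.toList := by
  have h := (bLex_agree s.toList.length s.toList le_rfl).1 []
  unfold pvShlexSplit
  rw [h]
  cases bSkip s.toList <;> simp

-- grouping: pvCombine merges A's pending buffer into B's group list
def pvCombine (buff : List String) : List (List String) → List (List String)
  | [] => if buff ≠ [] then [buff] else []
  | g :: gs => (buff ++ g) :: gs

def pvPushHead (t : String) : List (List String) → List (List String)
  | [] => [[t]]
  | g :: gs => (t :: g) :: gs

theorem pvCombine_nil (gs : List (List String)) : pvCombine [] gs = gs := by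
  cases gs <;> simp [pvCombine]

theorem pvCombine_push (buff : List String) (t : String) (gs : List (List String)) :
    pvCombine buff (pvPushHead t gs) = pvCombine (buff ++ [t]) gs := by
  cases gs <;> simp [pvCombine, pvPushHead]

theorem bChunks_nil (pipe : String) : bChunks pipe [] = [] := by
  rw [bChunks]; simp

theorem bChunks_cons_pipe (pipe : String) (ts : List String) :
    bChunks pipe (pipe :: ts) = [] :: bChunks pipe ts := by
  rw [bChunks]
  simp [List.dropWhile, List.takeWhile]

theorem bChunks_cons_ne (pipe t : String) (ts : List String) (h : ¬ (t == pipe) = true) :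
    bChunks pipe (t :: ts) = pvPushHead t (bChunks pipe ts) := by
  cases hd : ts.dropWhile (fun x => !(x == pipe)) with
  | nil =>
      have hd' : (t :: ts).dropWhile (fun x => !(x == pipe)) = [] := by
        rw [List.dropWhile_cons]; simp [h, hd]
      conv_lhs => rw [bChunks]
      conv_rhs => rw [bChunks]
      rw [dif_pos hd', dif_pos hd]
      cases ts with
      | nil => simp [pvPushHead]
      | cons u us => simp [pvPushHead]
  | cons p r' =>
      have hd' : (t :: ts).dropWhile (fun x => !(x == pipe)) = p :: r' := by
        rw [List.dropWhile_cons]; simp [h, hd]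
      conv_lhs => rw [bChunks]
      conv_rhs => rw [bChunks]
      rw [dif_neg (by rw [hd']; simp), dif_neg (by rw [hd]; simp)]
      rw [hd', hd, List.takeWhile_cons]
      simp [h, pvPushHead]

theorem pvGoA_eq (pipe : String) (ts : List String) :
    ∀ buff, pvGoA pipe buff ts = pvCombine buff (bChunks pipe ts) := by
  induction ts with
  | nil => intro buff; simp [pvGoA, bChunks_nil, pvCombine]
  | cons t ts ih =>
      intro buff
      by_cases h : (t == pipe) = true
      · have ht : t = pipe := by simpa using h
        subst ht
        simp only [pvGoA, h, if_pos, bChunks_cons_pipe]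
        rw [ih [], pvCombine_nil]
        simp [pvCombine]
      · simp only [pvGoA, h, if_neg, Bool.false_eq_true, not_false_eq_true]
        rw [ih (buff ++ [t]), bChunks_cons_ne pipe t ts h, pvCombine_push]

-- ===== VERDICT (by name: the statement is the Claim_ definition above) =====
theorem str_parse_spec : Claim_equal_str_parse := by
  intro cmds pipe_operator _hdom _hpre
  unfold Spec_str_parse str_parse str_parse_alt
  rw [bLex_eq]
  cases bSkip cmds.toList with
  | none => rfl
  | some toks =>
      simpa [pvCombine_nil] using pvGoA_eq pipe_operator toks []
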